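-- pv_equiv track=rewrite | github.com/ghluka/ICS3U1-Schoolwork | warmups/block4/strings/case_seperator.py | case_separator
-- ===== SOURCE A (Python) =====
-- def case_separator(text:str) -> str:
--     out = ""
--
--     uppers = ""
--     lowers = ""
--     for c in text:
--         if c in "ABCDEFGHIJKLMNOPQRSTUVWXYZ":
--             uppers += c
--         elif c == " ":
--             out += f"{uppers}{lowers}\n"
--             uppers = ""
--             lowers = ""
--         else:
--             lowers += c
--     out += f"{uppers}{lowers}"
--
--     return out
-- ===== SOURCE B (Python) =====
-- def case_separator(text:str) -> str:
--     U = "ABCDEFGHIJKLMNOPQRSTUVWXYZ"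
--     def sep(w):
--         ups = "".join(c for c in w if c in U)
--         lows = "".join(c for c in w if c not in U)
--         return ups + lows
--     return "\n".join(sep(w) for w in text.split(" "))
-- ===== Notes on version B (the rewrite author's own statement) =====
-- stated objective: simpler
-- what changed: Replaced the streaming three-accumulator state machine with split on a literal space, two per-word filters (uppercase then the rest), and a newline join.
import Mathlib
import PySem

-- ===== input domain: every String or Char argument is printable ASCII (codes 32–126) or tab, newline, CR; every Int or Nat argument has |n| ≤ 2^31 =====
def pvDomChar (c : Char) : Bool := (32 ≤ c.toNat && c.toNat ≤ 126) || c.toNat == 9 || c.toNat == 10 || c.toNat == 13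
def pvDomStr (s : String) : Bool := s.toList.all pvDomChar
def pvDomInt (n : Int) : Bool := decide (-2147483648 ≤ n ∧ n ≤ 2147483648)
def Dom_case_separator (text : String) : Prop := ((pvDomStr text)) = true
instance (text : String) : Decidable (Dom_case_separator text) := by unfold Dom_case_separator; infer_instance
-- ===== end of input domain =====

-- B replaces A's streaming three-accumulator state machine by split-on-space + two filters per word
-- joined with newlines (objective: simpler). Same cost; equivalence proved on all inputs.

-- the literal "ABCDEFGHIJKLMNOPQRSTUVWXYZ" both Pythons test membership in
def pvUppers : List Char := "ABCDEFGHIJKLMNOPQRSTUVWXYZ".toList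

-- ===== PORT A =====
-- the for-loop of A, state (out, uppers, lowers); the final 'out += f"{uppers}{lowers}"' is the [] case
def caseSepGo : List Char → List Char → List Char → List Char → List Char
  | [], out, ups, lows => out ++ ups ++ lows
  | c :: cs, out, ups, lows =>
    if pvUppers.contains c then caseSepGo cs out (ups ++ [c]) lows
    else if c = ' ' then caseSepGo cs (out ++ ups ++ lows ++ ['\n']) [] []
    else caseSepGo cs out ups (lows ++ [c])

def case_separator (text : String) : String :=
  String.ofList (caseSepGo text.toList [] [] [])

-- ===== PORT B =====
-- hand port of Python's str.split(" ") (single-space separator): exact — every space starts a new piece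
def splitSp : List Char → List (List Char)
  | [] => [[]]
  | c :: cs =>
    if c = ' ' then [] :: splitSp cs
    else match splitSp cs with
      | [] => [[c]]
      | w :: ws => (c :: w) :: ws

-- sep(w) of Source B: uppercase filter then the rest
def sepWord (w : List Char) : List Char :=
  w.filter (fun c => pvUppers.contains c) ++ w.filter (fun c => ¬ pvUppers.contains c)

def case_separator_alt (text : String) : String :=
  String.ofList (PySem.Chars.join ['\n'] ((splitSp text.toList).map sepWord))

-- ===== PRECONDITION & SPEC =====
def Spec_case_separator (text : String) (out : String) : Prop := out = case_separator_alt text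
instance (text : String) (out : String) : Decidable (Spec_case_separator text out) := by unfold Spec_case_separator; infer_instance

-- ===== CLAIM (what is proved, stated in full; the proofs are below) =====
def Claim_equal_case_separator : Prop := ∀ (text : String), Dom_case_separator text → Spec_case_separator text (case_separator text)

-- ===== LEMMAS AND PROOFS =====

theorem splitSp_ne_nil (cs : List Char) : splitSp cs ≠ [] := by
  cases cs with
  | nil => simp [splitSp]
  | cons c cs =>
    simp only [splitSp]
    split
    · simp
    · cases h : splitSp cs <;> simp

theorem splitSp_no_space (w : List Char) (hw : ' ' ∉ w) : splitSp w = [w] := by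
  induction w with
  | nil => rfl
  | cons c cs ih =>
    have hc : c ≠ ' ' := fun h => hw (h ▸ List.mem_cons_self)
    have ih' := ih (fun h => hw (List.mem_cons_of_mem _ h))
    simp [splitSp, hc, ih']

theorem splitSp_append_space (w cs : List Char) (hw : ' ' ∉ w) :
    splitSp (w ++ ' ' :: cs) = w :: splitSp cs := by
  induction w with
  | nil => simp [splitSp]
  | cons c w ih =>
    have hc : c ≠ ' ' := fun h => hw (h ▸ List.mem_cons_self)
    have ih' := ih (fun h => hw (List.mem_cons_of_mem _ h))
    simp [splitSp, hc, ih']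

-- the loop invariant: with the current partial word w (no space), A's state is the two filters of w,
-- and finishing the loop yields out ++ B's rendering of the remaining text w ++ cs
theorem caseSepGo_eq (cs : List Char) : ∀ (out w : List Char), ' ' ∉ w →
    caseSepGo cs out (w.filter (fun c => pvUppers.contains c))
      (w.filter (fun c => ¬ pvUppers.contains c))
      = out ++ PySem.Chars.join ['\n'] ((splitSp (w ++ cs)).map sepWord) := by
  induction cs with
  | nil =>
    intro out w hw
    simp [caseSepGo, splitSp_no_space w hw, PySem.Chars.join_singleton, sepWord]
  | cons c cs ih =>
    intro out w hw
    by_cases hup : c ∈ pvUppers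
    · have hc : c ≠ ' ' := by
        intro h; subst h; simp [pvUppers] at hup
      have hw' : ' ' ∉ w ++ [c] := by
        simp [hc.symm]; exact hw
      have hrec := ih out (w ++ [c]) hw'
      simp only [List.filter_append, List.filter_cons, List.append_assoc] at hrec ⊢
      simpa [caseSepGo, hup] using hrec
    · by_cases hsp : c = ' '
      · subst hsp
        have hrec := ih (out ++ w.filter (fun c => pvUppers.contains c)
            ++ w.filter (fun c => ¬ pvUppers.contains c) ++ ['\n']) [] (by simp)
        simp only [List.filter_nil, List.nil_append] at hrec
        obtain ⟨h, t, hht⟩ : ∃ h t, splitSp cs = h :: t := by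
          cases hx : splitSp cs with
          | nil => exact absurd hx (splitSp_ne_nil cs)
          | cons h t => exact ⟨h, t, rfl⟩
        rw [splitSp_append_space w cs hw, hht]
        rw [hht] at hrec
        simp only [caseSepGo, List.map_cons, PySem.Chars.join_cons_cons]
        simpa [sepWord, hup] using hrec
      · have hw' : ' ' ∉ w ++ [c] := by
          simp [Ne.symm hsp]; exact hw
        have hrec := ih out (w ++ [c]) hw'
        simp only [List.filter_append, List.filter_cons, List.append_assoc] at hrec ⊢
        simpa [caseSepGo, hup, hsp] using hrec

-- ===== VERDICT (by name: the statement is the Claim_ definition above) =====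
theorem case_separator_spec : Claim_equal_case_separator := by
  intro text _
  unfold Spec_case_separator case_separator case_separator_alt
  have h := caseSepGo_eq text.toList [] [] (by simp)
  simp only [List.filter_nil, List.nil_append] at h
  exact congrArg String.ofList h
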